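-- pv_equiv track=rewrite | github.com/eliottcassidy2000/math | 03-artifacts/code/proof_strategy_analysis.py | h_start
-- ===== SOURCE A (Python) =====
-- def h_start(T, vertices, source):
--     """#Ham paths through `vertices` starting at `source`."""
--     if len(vertices) == 1:
--         return 1 if source in vertices else 0
--     vlist = sorted(vertices)
--     m = len(vlist)
--     idx = {v: k for k, v in enumerate(vlist)}
--     sub = [[0]*m for _ in range(m)]
--     for a in vlist:
--         for b in vlist:
--             if a != b:
--                 sub[idx[a]][idx[b]] = T[a][b]
--     # DP starting from source
--     dp = {(1 << idx[source], idx[source]): 1}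
--     for mask in range(1, 1 << m):
--         for v in range(m):
--             if not ((mask >> v) & 1):
--                 continue
--             if (mask, v) not in dp:
--                 continue
--             for u in range(m):
--                 if (mask >> u) & 1:
--                     continue
--                 if sub[v][u]:
--                     key = (mask | (1 << u), u)
--                     dp[key] = dp.get(key, 0) + dp[(mask, v)]
--     full = (1 << m) - 1
--     return sum(dp.get((full, v), 0) for v in range(m))
-- ===== SOURCE B (Python) =====
-- def h_start(T, vertices, source):
--     """#Ham paths through `vertices` starting at `source`."""
--     if len(vertices) == 1:
--         return 1 if source in vertices else 0
--     vlist = sorted(vertices)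
--     m = len(vlist)
--     idx = {v: k for k, v in enumerate(vlist)}
--     sub = [[0]*m for _ in range(m)]
--     for a in vlist:
--         for b in vlist:
--             if a != b:
--                 sub[idx[a]][idx[b]] = T[a][b]
--     # plain backtracking over the remaining index set
--     def rec(v, remaining):
--         if not remaining:
--             return 1
--         total = 0
--         for u in remaining:
--             if sub[v][u]:
--                 total += rec(u, [w for w in remaining if w != u])
--         return total
--     s = idx[source]
--     return rec(s, [u for u in range(m) if u != s])
-- ===== Notes on version B (the rewrite author's own statement) =====
-- stated objective: alternative
-- what changed: B keeps the guard and the sorted-vertex/index/adjacency-matrix setup but replaces A's bottom-up bitmask dynamic program (a dict keyed by (mask, endpoint) filled over all 2^m masks) with a direct recursive backtracking enumeration that extends the path over the list of remaining indices - no bitmasks and no dict.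
import Mathlib
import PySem

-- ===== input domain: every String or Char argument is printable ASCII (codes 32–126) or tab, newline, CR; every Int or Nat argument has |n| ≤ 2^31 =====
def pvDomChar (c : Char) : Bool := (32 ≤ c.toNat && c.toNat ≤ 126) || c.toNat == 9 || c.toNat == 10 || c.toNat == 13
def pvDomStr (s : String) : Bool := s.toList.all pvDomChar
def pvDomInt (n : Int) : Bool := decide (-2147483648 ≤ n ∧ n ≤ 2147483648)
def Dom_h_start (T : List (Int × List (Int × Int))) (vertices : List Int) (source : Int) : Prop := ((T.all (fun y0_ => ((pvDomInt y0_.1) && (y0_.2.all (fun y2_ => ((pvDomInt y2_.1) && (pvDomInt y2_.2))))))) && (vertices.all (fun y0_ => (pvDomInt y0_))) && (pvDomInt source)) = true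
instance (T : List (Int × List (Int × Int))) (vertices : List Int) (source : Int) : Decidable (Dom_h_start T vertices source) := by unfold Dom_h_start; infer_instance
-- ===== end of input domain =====

-- B replaces A's bottom-up bitmask DP (dict keyed by (mask, endpoint) over all 2^m masks) with a
-- direct recursive backtracking count over the list of remaining indices; same guard and setup,
-- same return value on every input on which A returns (Pre_ excludes exactly A's KeyErrors).

-- ===== PORT A =====
-- shared setup helpers (both Pythons contain these lines verbatim)
-- sub[i][j]  (indices always in range on the inputs either program reaches)
def pvMatGet (sub : List (List Int)) (i j : Nat) : Int := (sub.getD i []).getD j 0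
-- sub[i][j] = x
def pvMatSet (sub : List (List Int)) (i j : Nat) (x : Int) : List (List Int) :=
  sub.set i ((sub.getD i []).set j x)
-- T[a][b]  (keys present under Pre_; `getD` default is never used inside Pre_)
def pvTGet (T : List (Int × List (Int × Int))) (a b : Int) : Int :=
  (PySem.Dict.mk ((PySem.Dict.mk T).getD a [])).getD b 0
-- idx = {v: k for k, v in enumerate(vlist)}
def pvIdx (vlist : List Int) : PySem.Dict Int Int :=
  (PySem.List.enumerate vlist 0).foldl (fun d kv => d.insert kv.2 kv.1) PySem.Dict.empty
-- the double loop filling sub (idx values are enumerate indices, hence ≥ 0: `.toNat` is exact)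
def pvSub (T : List (Int × List (Int × Int))) (vlist : List Int) (idx : PySem.Dict Int Int) (m : Nat) : List (List Int) :=
  vlist.foldl (fun s a => vlist.foldl (fun s b =>
      if a ≠ b then pvMatSet s (idx.getD a 0).toNat (idx.getD b 0).toNat (pvTGet T a b) else s) s)
    (List.replicate m (List.replicate m 0))

-- A's innermost loop body: for u in range(m): ...
def pvUStep (sub : List (List Int)) (mask v : Nat) (dp : PySem.Dict (Nat × Nat) Int) (u : Nat) : PySem.Dict (Nat × Nat) Int :=
  if (mask >>> u) &&& 1 ≠ 0 then dp
  else if pvMatGet sub v u ≠ 0 then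
    dp.insert (mask ||| (1 <<< u), u) (dp.getD (mask ||| (1 <<< u), u) 0 + dp.getD (mask, v) 0)
  else dp

-- A's middle loop body: for v in range(m): ...
def pvVStep (sub : List (List Int)) (m mask : Nat) (dp : PySem.Dict (Nat × Nat) Int) (v : Nat) : PySem.Dict (Nat × Nat) Int :=
  if (mask >>> v) &&& 1 = 0 then dp
  else if dp.contains (mask, v) = false then dp
  else (List.range m).foldl (pvUStep sub mask v) dp

-- A's outer loop body: for mask in range(1, 1 << m): ...
def pvMaskStep (sub : List (List Int)) (m : Nat) (dp : PySem.Dict (Nat × Nat) Int) (mask : Nat) : PySem.Dict (Nat × Nat) Int :=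
  (List.range m).foldl (pvVStep sub m mask) dp

def h_start (T : List (Int × List (Int × Int))) (vertices : List Int) (source : Int) : Int :=
  if vertices.length = 1 then (if source ∈ vertices then 1 else 0)
  else
    let vlist := PySem.List.sorted vertices (fun v => v)
    let m := vlist.length
    let idx := pvIdx vlist
    let sub := pvSub T vlist idx m
    -- masks are Python ints that stay ≥ 0 here: ported as Nat (range(1, 1 << m) = List.range' 1 (2^m - 1))
    let s := (idx.getD source 0).toNat
    let dp := (List.range' 1 ((1 <<< m) - 1)).foldl (pvMaskStep sub m)
                (PySem.Dict.empty.insert (1 <<< s, s) 1)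
    let full := (1 <<< m) - 1
    (List.range m).foldl (fun acc v => acc + dp.getD (full, v) 0) 0

-- ===== PORT B =====
-- rec(v, remaining) of Source B; the extra `fuel` only makes the recursion structural: every call made
-- from h_start_alt has remaining.length < fuel, so the fuel-0 branch is never reached.
def recB (sub : List (List Int)) : Nat → Nat → List Nat → Int
  | 0, _, _ => 1
  | fuel + 1, v, remaining =>
    if remaining = [] then 1
    else remaining.foldl (fun total u =>
        if pvMatGet sub v u ≠ 0 then total + recB sub fuel u (remaining.filter (fun w => w ≠ u))
        else total) 0

def h_start_alt (T : List (Int × List (Int × Int))) (vertices : List Int) (source : Int) : Int :=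
  if vertices.length = 1 then (if source ∈ vertices then 1 else 0)
  else
    let vlist := PySem.List.sorted vertices (fun v => v)
    let m := vlist.length
    let idx := pvIdx vlist
    let sub := pvSub T vlist idx m
    let s := (idx.getD source 0).toNat
    recB sub m s ((List.range m).filter (fun u => u ≠ s))

-- ===== PRECONDITION & SPEC =====
-- T[a][b] exists (as a Bool, so Pre_ stays decidable)
def pvHasPair (T : List (Int × List (Int × Int))) (a b : Int) : Bool :=
  match (PySem.Dict.mk T).get? a with
  | none => false
  | some row => ((PySem.Dict.mk row).get? b).isSome

-- Pre_ excludes exactly the inputs on which A raises KeyError: with len(vertices) ≠ 1, A needs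
-- source ∈ vertices (for idx[source]) and T[a][b] for every pair a ≠ b of vertices; B raises there too.
def Pre_h_start (T : List (Int × List (Int × Int))) (vertices : List Int) (source : Int) : Prop :=
  vertices.length = 1 ∨
    (source ∈ vertices ∧ ∀ a ∈ vertices, ∀ b ∈ vertices, a ≠ b → pvHasPair T a b = true)
instance (T : List (Int × List (Int × Int))) (vertices : List Int) (source : Int) : Decidable (Pre_h_start T vertices source) := by unfold Pre_h_start; infer_instance

def pvWitness_h_start : (List (Int × List (Int × Int))) × List Int × Int :=
  ([(0, [(1, 1)]), (1, [(0, 1)])], [0, 1], 0)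

def Spec_h_start (T : List (Int × List (Int × Int))) (vertices : List Int) (source : Int) (out : Int) : Prop := out = h_start_alt T vertices source
instance (T : List (Int × List (Int × Int))) (vertices : List Int) (source : Int) (out : Int) : Decidable (Spec_h_start T vertices source out) := by unfold Spec_h_start; infer_instance

-- ===== CLAIM (what is proved, stated in full; the proofs are below) =====
def Claim_equal_h_start : Prop := ∀ (T : List (Int × List (Int × Int))) (vertices : List Int) (source : Int), Dom_h_start T vertices source → Pre_h_start T vertices source → Spec_h_start T vertices source (h_start T vertices source)

-- ===== LEMMAS AND PROOFS =====

-- canonical (fuel-free) view of recB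
def pvC (sub : List (List Int)) (v : Nat) (rem : List Nat) : Int := recB sub (rem.length + 1) v rem
-- the list of indices < m whose bit is NOT set in K (what "remaining" is at dp key K)
def pvComp (m K : Nat) : List Nat := (List.range m).filter (fun i => !(K.testBit i))
-- weight of a dp key: ways to finish a path standing at k.2 having visited exactly the bits of k.1
def pvCoef (sub : List (List Int)) (m : Nat) (k : Nat × Nat) : Int := pvC sub k.2 (pvComp m k.1)
-- value-weighted sum over dict items
def pvWsum (f : Nat × Nat → Int) (l : List ((Nat × Nat) × Int)) : Int :=
  (l.map (fun e => f e.1 * e.2)).sum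
-- dp dictionary invariant of A's loop
def pvGood (m : Nat) (dp : PySem.Dict (Nat × Nat) Int) : Prop :=
  dp.keys.Nodup ∧ ∀ k ∈ dp.keys, k.2 < m ∧ k.1.testBit k.2 = true ∧ k.1 < 2 ^ m
-- conserved potential: mass of all not-yet-processed dp entries, weighted by pvCoef
def pvPhiGe (sub : List (List Int)) (m M : Nat) (dp : PySem.Dict (Nat × Nat) Int) : Int :=
  pvWsum (fun k => if M ≤ k.1 then pvCoef sub m k else 0) dp.items
def pvPhiGt (sub : List (List Int)) (m M : Nat) (dp : PySem.Dict (Nat × Nat) Int) : Int :=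
  pvWsum (fun k => if M < k.1 then pvCoef sub m k else 0) dp.items

theorem pvTestBit (mask u : Nat) : (mask >>> u) &&& 1 = (if mask.testBit u then 1 else 0) := by
  have e : (mask >>> u) &&& 1 = mask / 2 ^ u % 2 := by
    rw [Nat.and_one_is_mod, Nat.shiftRight_eq_div_pow]
  rw [e, Nat.testBit_eq_decide_div_mod_eq]
  rcases Nat.mod_two_eq_zero_or_one (mask / 2 ^ u) with h | h <;> simp [h]

theorem pvFilter_lt (rem : List Nat) (u : Nat) (hu : u ∈ rem) :
    (rem.filter (fun w => w ≠ u)).length < rem.length := by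
  rw [List.length_filter_lt_length_iff_exists]
  exact ⟨u, hu, by simp⟩

theorem pvFoldl_add_if {p : Nat → Prop} [DecidablePred p] (g : Nat → Int) :
    ∀ (l : List Nat) (a : Int),
      l.foldl (fun t u => if p u then t + g u else t) a
        = a + (l.map (fun u => if p u then g u else 0)).sum := by
  intro l
  induction l with
  | nil => intro a; simp
  | cons u l ih =>
    intro a
    by_cases h : p u <;> simp [h, ih] <;> ring

theorem pvSum_filter (l : List Nat) (q : Nat → Bool) (g : Nat → Int) :
    ((l.filter q).map g).sum = (l.map (fun u => if q u then g u else 0)).sum := by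
  induction l with
  | nil => rfl
  | cons a l ih => by_cases h : q a <;> simp [h, ih]

theorem recB_succ (sub : List (List Int)) (fuel v : Nat) (rem : List Nat) :
    recB sub (fuel + 1) v rem
      = if rem = [] then 1
        else rem.foldl (fun total u =>
          if pvMatGet sub v u ≠ 0 then total + recB sub fuel u (rem.filter (fun w => w ≠ u))
          else total) 0 := rfl

theorem recB_fuel (sub : List (List Int)) : ∀ (n f1 f2 v : Nat) (rem : List Nat),
    rem.length ≤ n → rem.length < f1 → rem.length < f2 → recB sub f1 v rem = recB sub f2 v rem := by
  intro n
  induction n with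
  | zero =>
    intro f1 f2 v rem hlen h1 h2
    have hr : rem = [] := List.length_eq_zero_iff.mp (by omega)
    subst hr
    match f1, f2, h1, h2 with
    | a + 1, b + 1, _, _ => simp [recB]
  | succ n ih =>
    intro f1 f2 v rem hlen h1 h2
    match f1, f2, h1, h2 with
    | a + 1, b + 1, _, _ =>
      rw [recB_succ, recB_succ]
      by_cases hr : rem = []
      · rw [if_pos hr, if_pos hr]
      · rw [if_neg hr, if_neg hr]
        apply PySem.List.foldl_congr_mem
        intro acc u hu
        beta_reduce
        have hflt := pvFilter_lt rem u hu
        by_cases hs : pvMatGet sub v u ≠ 0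
        · rw [if_pos hs, if_pos hs, ih a b u (rem.filter (fun w => w ≠ u)) (by omega) (by omega) (by omega)]
        · rw [if_neg hs, if_neg hs]

theorem pvC_nil (sub : List (List Int)) (v : Nat) : pvC sub v [] = 1 := by
  simp [pvC, recB]

theorem pvC_sum (sub : List (List Int)) (v : Nat) (rem : List Nat) (h : rem ≠ []) :
    pvC sub v rem =
      (rem.map (fun u => if pvMatGet sub v u ≠ 0 then pvC sub u (rem.filter (fun w => w ≠ u)) else 0)).sum := by
  unfold pvC
  rw [recB_succ, if_neg h]
  rw [PySem.List.foldl_congr_mem rem _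
      (fun total u => if pvMatGet sub v u ≠ 0
        then total + pvC sub u (rem.filter (fun w => w ≠ u)) else total) 0 ?hcong]
  case hcong =>
    intro acc u hu
    beta_reduce
    have hflt := pvFilter_lt rem u hu
    by_cases hs : pvMatGet sub v u ≠ 0
    · rw [if_pos hs, if_pos hs,
        recB_fuel sub rem.length rem.length ((rem.filter (fun w => w ≠ u)).length + 1) u _
          (by omega) (by omega) (by omega)]
      rfl
    · rw [if_neg hs, if_neg hs]
  rw [pvFoldl_add_if (p := fun u => pvMatGet sub v u ≠ 0)
      (fun u => pvC sub u (rem.filter (fun w => w ≠ u))) rem 0, zero_add]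
  rfl

theorem pvWsum_cons (f : Nat × Nat → Int) (e : (Nat × Nat) × Int) (l : List ((Nat × Nat) × Int)) :
    pvWsum f (e :: l) = f e.1 * e.2 + pvWsum f l := by
  simp [pvWsum]

theorem pvWsum_congr (f g : Nat × Nat → Int) (l : List ((Nat × Nat) × Int))
    (h : ∀ e ∈ l, f e.1 = g e.1) : pvWsum f l = pvWsum g l := by
  induction l with
  | nil => rfl
  | cons e l ih =>
    rw [pvWsum_cons, pvWsum_cons, h e (by simp), ih (fun e' he' => h e' (by simp [he']))]

theorem pvWsum_add (f g : Nat × Nat → Int) (l : List ((Nat × Nat) × Int)) :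
    pvWsum (fun k => f k + g k) l = pvWsum f l + pvWsum g l := by
  induction l with
  | nil => rfl
  | cons e l ih => rw [pvWsum_cons, pvWsum_cons, pvWsum_cons, ih]; ring

theorem pvWsum_insert_aux (f : Nat × Nat → Int) :
    ∀ (items : List ((Nat × Nat) × Int)) (k : Nat × Nat) (x : Int),
      (items.map (fun p => p.1)).Nodup →
      pvWsum f ((PySem.Dict.mk items).insert k ((PySem.Dict.mk items).getD k 0 + x)).items
        = pvWsum f items + f k * x := by
  intro items
  induction items with
  | nil =>
    intro k x _
    simp [PySem.Dict.insert, PySem.Dict.contains, PySem.Dict.getD, PySem.Dict.get?, pvWsum]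
  | cons e rest ih =>
    obtain ⟨ek, ev⟩ := e
    intro k x hnd
    have hnd' : (rest.map (fun p => p.1)).Nodup := (List.nodup_cons.mp hnd).2
    have hknotin : ek ∉ rest.map (fun p => p.1) := (List.nodup_cons.mp hnd).1
    by_cases hek : ek = k
    · -- head key is k: insert overwrites in place
      have hcont : (PySem.Dict.mk ((ek, ev) :: rest)).contains k = true := by
        simp [PySem.Dict.contains, hek]
      have hgd : (PySem.Dict.mk ((ek, ev) :: rest)).getD k 0 = ev := by
        simp [PySem.Dict.getD, PySem.Dict.get?_mk_cons, hek]
      rw [PySem.Dict.items_insert_of_contains _ _ hcont, hgd]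
      have hmap : rest.map (fun p => if (p.1 == k) = true then (k, ev + x) else p) = rest := by
        have hcg : rest.map (fun p => if (p.1 == k) = true then (k, ev + x) else p) = rest.map id := by
          apply List.map_congr_left
          intro p hp
          have hne : p.1 ≠ k := by
            intro he
            refine hknotin ?_
            rw [hek, ← he]
            exact List.mem_map_of_mem hp
          simp [hne]
        rw [hcg, List.map_id]
      rw [List.map_cons, if_pos (by simp [hek]), hmap, pvWsum_cons, pvWsum_cons, ← hek]
      ring
    · -- head key differs: insert acts on the tail dict
      have hbeq : (ek == k) = false := by simp [hek]
      have hcont : (PySem.Dict.mk ((ek, ev) :: rest)).contains k = (PySem.Dict.mk rest).contains k := by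
        simp [PySem.Dict.contains, hbeq]
      have hgd : (PySem.Dict.mk ((ek, ev) :: rest)).getD k 0 = (PySem.Dict.mk rest).getD k 0 := by
        unfold PySem.Dict.getD
        rw [PySem.Dict.get?_mk_cons, if_neg (by simp [hek])]
      have hitems :
          ((PySem.Dict.mk ((ek, ev) :: rest)).insert k ((PySem.Dict.mk ((ek, ev) :: rest)).getD k 0 + x)).items
            = (ek, ev) :: ((PySem.Dict.mk rest).insert k ((PySem.Dict.mk rest).getD k 0 + x)).items := by
        by_cases hc : (PySem.Dict.mk rest).contains k = true
        · rw [PySem.Dict.items_insert_of_contains _ _ (by rw [hcont]; exact hc),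
              PySem.Dict.items_insert_of_contains _ _ hc, hgd]
          rw [List.map_cons, if_neg (by simp [hek])]
        · have hc' : (PySem.Dict.mk rest).contains k = false := by
            cases h : (PySem.Dict.mk rest).contains k
            · rfl
            · exact absurd h hc
          rw [PySem.Dict.items_insert_of_not_contains _ _ (by rw [hcont]; exact hc'),
              PySem.Dict.items_insert_of_not_contains _ _ hc', hgd]
          rfl
      rw [hitems, pvWsum_cons, pvWsum_cons, ih k x hnd']
      ring

theorem pvWsum_insert (f : Nat × Nat → Int) (d : PySem.Dict (Nat × Nat) Int)
    (hnd : d.keys.Nodup) (k : Nat × Nat) (x : Int) :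
    pvWsum f ((d.insert k (d.getD k 0 + x)).items) = pvWsum f d.items + f k * x := by
  obtain ⟨items⟩ := d
  exact pvWsum_insert_aux f items k x hnd

theorem pvSum_point (m v0 : Nat) (hv0 : v0 < m) (fn : Nat → Int) (x : Int) (hf : fn v0 = 0) :
    ((List.range m).map (fun v => if v = v0 then x else fn v)).sum
      = x + ((List.range m).map fn).sum := by
  induction m with
  | zero => omega
  | succ m ih =>
    rw [List.range_succ]
    by_cases hvm : v0 = m
    · subst hvm
      have : (List.range v0).map (fun v => if v = v0 then x else fn v) = (List.range v0).map fn := by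
        apply List.map_congr_left
        intro v hv
        have : v ≠ v0 := by have := List.mem_range.mp hv; omega
        simp [this]
      simp [this, hf, Int.add_comm]
    · have hv0' : v0 < m := by omega
      have hmne : m ≠ v0 := fun h => hvm h.symm
      simp only [List.map_append, List.sum_append, List.map_cons, List.map_nil, List.sum_cons,
        List.sum_nil, hmne, if_false, ih hv0']
      ring

theorem pvContains_false_of_not_mem (items : List ((Nat × Nat) × Int)) (k : Nat × Nat)
    (h : k ∉ items.map (fun p => p.1)) : (PySem.Dict.mk items).contains k = false := by
  cases hc : (PySem.Dict.mk items).contains k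
  · rfl
  · exact absurd ((PySem.Dict.contains_iff_mem_keys _ _).mp hc) h

theorem pvSum_getD_aux (M m : Nat) (g : Nat → Int) :
    ∀ (items : List ((Nat × Nat) × Int)),
      (items.map (fun p => p.1)).Nodup →
      (∀ e ∈ items, e.1.1 = M → e.1.2 < m) →
      ((List.range m).map (fun v => (PySem.Dict.mk items).getD (M, v) 0 * g v)).sum
        = pvWsum (fun k => if k.1 = M then g k.2 else 0) items := by
  intro items
  induction items with
  | nil =>
    intro _ _
    simp [PySem.Dict.getD, PySem.Dict.get?, pvWsum]
  | cons e rest ih =>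
    obtain ⟨ek, ev⟩ := e
    intro hnd hk
    have hnd' : (rest.map (fun p => p.1)).Nodup := (List.nodup_cons.mp hnd).2
    have hknotin : ek ∉ rest.map (fun p => p.1) := (List.nodup_cons.mp hnd).1
    rw [pvWsum_cons]
    by_cases hM : ek.1 = M
    · have hv0 : ek.2 < m := hk (ek, ev) (by simp) hM
      have he1 : ek = (M, ek.2) := by
        rw [← hM]
      have hrest0 : (PySem.Dict.mk rest).getD (M, ek.2) 0 = 0 := by
        apply PySem.Dict.getD_of_not_contains
        apply pvContains_false_of_not_mem
        rw [← he1]; exact hknotin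
      have hmapeq : (List.range m).map (fun v => (PySem.Dict.mk ((ek, ev) :: rest)).getD (M, v) 0 * g v)
          = (List.range m).map (fun v => if v = ek.2 then ev * g ek.2
              else (PySem.Dict.mk rest).getD (M, v) 0 * g v) := by
        apply List.map_congr_left
        intro v _
        by_cases hv : v = ek.2
        · subst hv
          rw [if_pos rfl]
          unfold PySem.Dict.getD
          rw [PySem.Dict.get?_mk_cons, if_pos (by rw [he1]; exact beq_self_eq_true _)]
          rfl
        · have hb : ¬ ((ek == (M, v)) = true) := by
            simp only [beq_iff_eq]
            intro he
            rw [he1] at he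
            exact hv (congrArg Prod.snd he).symm
          rw [if_neg hv]
          unfold PySem.Dict.getD
          rw [PySem.Dict.get?_mk_cons, if_neg hb]
      rw [hmapeq, pvSum_point m ek.2 hv0 _ _ (by rw [hrest0]; ring),
        ih hnd' (fun e' he' => hk e' (by simp [he']))]
      rw [if_pos hM]
      ring
    · have hmapeq : (List.range m).map (fun v => (PySem.Dict.mk ((ek, ev) :: rest)).getD (M, v) 0 * g v)
          = (List.range m).map (fun v => (PySem.Dict.mk rest).getD (M, v) 0 * g v) := by
        apply List.map_congr_left
        intro v _
        have hb : ¬ ((ek == (M, v)) = true) := by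
          simp only [beq_iff_eq]
          intro he
          exact hM (by rw [he])
        unfold PySem.Dict.getD
        rw [PySem.Dict.get?_mk_cons, if_neg hb]
      rw [hmapeq, ih hnd' (fun e' he' => hk e' (by simp [he'])), if_neg hM]
      ring

theorem pvSum_getD_eq_wsum (dp : PySem.Dict (Nat × Nat) Int) (hnd : dp.keys.Nodup)
    (M m : Nat) (g : Nat → Int) (hk : ∀ k ∈ dp.keys, k.1 = M → k.2 < m) :
    ((List.range m).map (fun v => dp.getD (M, v) 0 * g v)).sum
      = pvWsum (fun k => if k.1 = M then g k.2 else 0) dp.items := by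
  obtain ⟨items⟩ := dp
  exact pvSum_getD_aux M m g items hnd
    (fun e he hM => hk e.1 (List.mem_map_of_mem he) hM)

theorem pvComp_two_pow (m s : Nat) :
    pvComp m (2 ^ s) = (List.range m).filter (fun u => u ≠ s) := by
  apply List.filter_congr
  intro i _
  simp [Nat.testBit_two_pow, eq_comm]

theorem pvComp_or (m K u : Nat) :
    (pvComp m K).filter (fun w => w ≠ u) = pvComp m (K ||| (1 <<< u)) := by
  unfold pvComp
  rw [List.filter_filter]
  apply List.filter_congr
  intro i _
  simp only [Nat.testBit_or, Nat.one_shiftLeft, Nat.testBit_two_pow]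
  by_cases hi : i = u
  · subst hi; simp
  · have : (u = i) = False := by simp; omega
    simp [this, hi]

theorem pvComp_full (m : Nat) : pvComp m (2 ^ m - 1) = [] := by
  unfold pvComp
  rw [List.filter_eq_nil_iff]
  intro i hi
  simp [Nat.testBit_two_pow_sub_one, List.mem_range.mp hi]

theorem pvComp_ne_nil (m M : Nat) (hM : M < 2 ^ m - 1) : pvComp m M ≠ [] := by
  intro h
  have hall : ∀ i, i < m → M.testBit i = true := by
    intro i hi
    have := List.filter_eq_nil_iff.mp h i (List.mem_range.mpr hi)
    simpa using this
  have hmod : M % 2 ^ m = 2 ^ m - 1 := by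
    apply Nat.eq_of_testBit_eq
    intro i
    rw [Nat.testBit_mod_two_pow, Nat.testBit_two_pow_sub_one]
    by_cases hi : i < m
    · simp [hi, hall i hi]
    · simp [hi]
  have := Nat.mod_le M (2 ^ m)
  omega

theorem pvGetD_eq (dp dp' : PySem.Dict (Nat × Nat) Int) (k : Nat × Nat)
    (h : dp.get? k = dp'.get? k) : dp.getD k 0 = dp'.getD k 0 := by
  simp [PySem.Dict.getD, h]

theorem pvUloop (sub : List (List Int)) (m mask v : Nat) (dval : Int) :
    ∀ (L : List Nat) (dp : PySem.Dict (Nat × Nat) Int), pvGood m dp → mask < 2 ^ m →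
      (∀ u ∈ L, u < m) → dp.getD (mask, v) 0 = dval →
      pvGood m (L.foldl (pvUStep sub mask v) dp) ∧
      (∀ (K x : Nat), K ≤ mask →
        (L.foldl (pvUStep sub mask v) dp).get? (K, x) = dp.get? (K, x)) ∧
      pvPhiGt sub m mask (L.foldl (pvUStep sub mask v) dp)
        = pvPhiGt sub m mask dp +
          dval * (L.map (fun u => if mask.testBit u = false ∧ pvMatGet sub v u ≠ 0
                    then pvCoef sub m (mask ||| (1 <<< u), u) else 0)).sum := by
  intro L
  induction L with
  | nil =>
    intro dp hG _ _ _
    exact ⟨hG, fun K x _ => rfl, by simp⟩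
  | cons u L ih =>
    intro dp hG hm hL hd
    have hu : u < m := hL u (by simp)
    have hL' : ∀ w ∈ L, w < m := fun w hw => hL w (by simp [hw])
    simp only [List.foldl_cons]
    by_cases hbit : mask.testBit u = true
    · have e1 : pvUStep sub mask v dp u = dp := by
        unfold pvUStep
        rw [pvTestBit, hbit]
        norm_num
      rw [e1]
      obtain ⟨a, b, c⟩ := ih dp hG hm hL' hd
      refine ⟨a, b, ?_⟩
      rw [c]
      simp [hbit]
    · have hbit' : mask.testBit u = false := by
        cases h : mask.testBit u
        · rfl
        · exact absurd h hbit
      by_cases hsub : pvMatGet sub v u ≠ 0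
      · -- the push step
        have e1 : pvUStep sub mask v dp u
            = dp.insert (mask ||| (1 <<< u), u)
                (dp.getD (mask ||| (1 <<< u), u) 0 + dp.getD (mask, v) 0) := by
          unfold pvUStep
          rw [pvTestBit, hbit']
          simp [hsub]
        rw [e1]
        have hk1 : mask < mask ||| (1 <<< u) := by
          have hle : mask ≤ mask ||| (1 <<< u) := Nat.left_le_or
          have hne : mask ≠ mask ||| (1 <<< u) := by
            intro he
            have h2 : (mask ||| (1 <<< u)).testBit u = true := by
              simp [Nat.testBit_or, Nat.one_shiftLeft]
            rw [← he, hbit'] at h2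
            exact Bool.false_ne_true h2
          omega
        have hk2 : mask ||| (1 <<< u) < 2 ^ m := by
          rw [Nat.one_shiftLeft]
          exact Nat.or_lt_two_pow hm (Nat.pow_lt_pow_right (by omega) hu)
        have hk3 : (mask ||| (1 <<< u)).testBit u = true := by
          simp [Nat.testBit_or, Nat.one_shiftLeft]
        set dp1 := dp.insert (mask ||| (1 <<< u), u)
            (dp.getD (mask ||| (1 <<< u), u) 0 + dp.getD (mask, v) 0) with hdp1
        have hG1 : pvGood m dp1 := by
          constructor
          · exact PySem.Dict.nodup_keys_insert _ _ _ hG.1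
          · intro k hk
            rcases (PySem.Dict.mem_keys_insert _ _ _ _).mp hk with rfl | hk
            · exact ⟨hu, hk3, hk2⟩
            · exact hG.2 k hk
        have hpres1 : ∀ (K x : Nat), K ≤ mask → dp1.get? (K, x) = dp.get? (K, x) := by
          intro K x hKle
          apply PySem.Dict.get?_insert_of_ne
          intro he
          have : K = mask ||| (1 <<< u) := congrArg Prod.fst he
          omega
        have hd1 : dp1.getD (mask, v) 0 = dval := by
          rw [pvGetD_eq dp1 dp (mask, v) (hpres1 mask v le_rfl)]
          exact hd
        obtain ⟨a, b, c⟩ := ih dp1 hG1 hm hL' hd1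
        refine ⟨a, fun K x hKle => (b K x hKle).trans (hpres1 K x hKle), ?_⟩
        rw [c]
        have hphi1 : pvPhiGt sub m mask dp1 = pvPhiGt sub m mask dp
            + (if mask < mask ||| (1 <<< u) then pvCoef sub m (mask ||| (1 <<< u), u) else 0) * dval := by
          unfold pvPhiGt
          rw [hdp1, hd]
          exact pvWsum_insert _ dp hG.1 (mask ||| (1 <<< u), u) dval
        rw [hphi1, if_pos hk1]
        rw [List.map_cons, List.sum_cons, if_pos ⟨hbit', hsub⟩]
        ring
      · have e1 : pvUStep sub mask v dp u = dp := by
          unfold pvUStep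
          rw [pvTestBit, hbit']
          simp [hsub]
        rw [e1]
        obtain ⟨a, b, c⟩ := ih dp hG hm hL' hd
        refine ⟨a, b, ?_⟩
        rw [c]
        simp [hsub]

theorem pvPush_sum (sub : List (List Int)) (m mask v : Nat) (hne : pvComp m mask ≠ []) :
    ((List.range m).map (fun u => if mask.testBit u = false ∧ pvMatGet sub v u ≠ 0
        then pvCoef sub m (mask ||| (1 <<< u), u) else 0)).sum
      = pvC sub v (pvComp m mask) := by
  rw [pvC_sum sub v _ hne]
  have hstep : ∀ u ∈ List.range m,
      (if mask.testBit u = false ∧ pvMatGet sub v u ≠ 0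
        then pvCoef sub m (mask ||| (1 <<< u), u) else 0)
      = (if (!mask.testBit u) = true
          then (if pvMatGet sub v u ≠ 0 then pvC sub u ((pvComp m mask).filter (fun w => w ≠ u)) else 0)
          else 0) := by
    intro u _
    by_cases hbit : mask.testBit u = true
    · simp [hbit]
    · have hbit' : mask.testBit u = false := by
        cases h : mask.testBit u
        · rfl
        · exact absurd h hbit
      by_cases hsub : pvMatGet sub v u ≠ 0
      · rw [pvComp_or m mask u]
        simp [hbit', hsub, pvCoef]
      · simp [hbit', hsub]
  rw [List.map_congr_left hstep]
  rw [← pvSum_filter (List.range m) (fun i => !mask.testBit i)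
      (fun u => if pvMatGet sub v u ≠ 0 then pvC sub u ((pvComp m mask).filter (fun w => w ≠ u)) else 0)]
  rfl

theorem pvVloop (sub : List (List Int)) (m mask : Nat) (dp0 : PySem.Dict (Nat × Nat) Int) :
    ∀ (L : List Nat) (dp : PySem.Dict (Nat × Nat) Int), pvGood m dp → mask < 2 ^ m →
      pvComp m mask ≠ [] → (∀ u ∈ L, u < m) →
      (∀ x : Nat, dp.get? (mask, x) = dp0.get? (mask, x)) →
      pvGood m (L.foldl (pvVStep sub m mask) dp) ∧
      (∀ x : Nat, (L.foldl (pvVStep sub m mask) dp).get? (mask, x) = dp0.get? (mask, x)) ∧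
      pvPhiGt sub m mask (L.foldl (pvVStep sub m mask) dp)
        = pvPhiGt sub m mask dp +
          (L.map (fun v => dp.getD (mask, v) 0 * pvC sub v (pvComp m mask))).sum := by
  intro L
  induction L with
  | nil =>
    intro dp hG _ _ _ hpres
    exact ⟨hG, hpres, by simp⟩
  | cons v L ih =>
    intro dp hG hm hne hL hpres
    have hv : v < m := hL v (by simp)
    have hL' : ∀ w ∈ L, w < m := fun w hw => hL w (by simp [hw])
    simp only [List.foldl_cons]
    by_cases hbit : mask.testBit v = true
    · by_cases hcont : dp.contains (mask, v) = true
      · -- real work: run the u-loop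
        have e1 : pvVStep sub m mask dp v = (List.range m).foldl (pvUStep sub mask v) dp := by
          unfold pvVStep
          rw [pvTestBit, hbit]
          simp [hcont]
        rw [e1]
        obtain ⟨a1, b1, c1⟩ := pvUloop sub m mask v (dp.getD (mask, v) 0) (List.range m) dp hG hm
          (fun u hu => List.mem_range.mp hu) rfl
        rw [pvPush_sum sub m mask v hne] at c1
        set dp1 := (List.range m).foldl (pvUStep sub mask v) dp with hdp1
        have hpres1 : ∀ x : Nat, dp1.get? (mask, x) = dp0.get? (mask, x) := by
          intro x
          rw [b1 mask x le_rfl]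
          exact hpres x
        obtain ⟨a2, b2, c2⟩ := ih dp1 a1 hm hne hL' hpres1
        refine ⟨a2, b2, ?_⟩
        rw [c2, c1]
        have hmap : L.map (fun v' => dp1.getD (mask, v') 0 * pvC sub v' (pvComp m mask))
            = L.map (fun v' => dp.getD (mask, v') 0 * pvC sub v' (pvComp m mask)) := by
          apply List.map_congr_left
          intro v' _
          rw [pvGetD_eq dp1 dp (mask, v') (b1 mask v' le_rfl)]
        rw [hmap]
        simp only [List.map_cons, List.sum_cons]
        ring
      · have hcont' : dp.contains (mask, v) = false := by
          cases h : dp.contains (mask, v)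
          · rfl
          · exact absurd h hcont
        have e1 : pvVStep sub m mask dp v = dp := by
          unfold pvVStep
          rw [pvTestBit, hbit]
          simp [hcont']
        rw [e1]
        obtain ⟨a, b, c⟩ := ih dp hG hm hne hL' hpres
        refine ⟨a, b, ?_⟩
        rw [c]
        have : dp.getD (mask, v) 0 = 0 := PySem.Dict.getD_of_not_contains _ _ hcont'
        simp [this]
    · have hbit' : mask.testBit v = false := by
        cases h : mask.testBit v
        · rfl
        · exact absurd h hbit
      have e1 : pvVStep sub m mask dp v = dp := by
        unfold pvVStep
        rw [pvTestBit, hbit']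
        simp
      rw [e1]
      obtain ⟨a, b, c⟩ := ih dp hG hm hne hL' hpres
      refine ⟨a, b, ?_⟩
      rw [c]
      have hnotkey : dp.contains (mask, v) = false := by
        cases h : dp.contains (mask, v)
        · rfl
        · have hmem := (PySem.Dict.contains_iff_mem_keys _ _).mp h
          have := (hG.2 (mask, v) hmem).2.1
          simp at this
          rw [this] at hbit'
          exact absurd hbit' (by simp)
      have : dp.getD (mask, v) 0 = 0 := PySem.Dict.getD_of_not_contains _ _ hnotkey
      simp [this]

theorem pvPhiGe_split (sub : List (List Int)) (m M : Nat) (dp : PySem.Dict (Nat × Nat) Int) :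
    pvPhiGe sub m M dp
      = pvPhiGt sub m M dp + pvWsum (fun k => if k.1 = M then pvCoef sub m k else 0) dp.items := by
  unfold pvPhiGe pvPhiGt
  rw [← pvWsum_add]
  apply pvWsum_congr
  intro e _
  by_cases h1 : e.1.1 = M
  · simp [h1]
  · by_cases h2 : M < e.1.1
    · have h3 : M ≤ e.1.1 := by omega
      simp [h1, h2, h3]
    · have h3 : ¬ M ≤ e.1.1 := by omega
      simp [h1, h2, h3]

theorem pvPhiGt_eq_ge_succ (sub : List (List Int)) (m M : Nat) (dp : PySem.Dict (Nat × Nat) Int) :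
    pvPhiGt sub m M dp = pvPhiGe sub m (M + 1) dp := by
  unfold pvPhiGe pvPhiGt
  apply pvWsum_congr
  intro e _
  by_cases h : M < e.1.1
  · rw [if_pos h, if_pos (by omega)]
  · rw [if_neg h, if_neg (by omega)]

theorem pvMaskStep_phi (sub : List (List Int)) (m mask : Nat) (dp : PySem.Dict (Nat × Nat) Int)
    (hGood : pvGood m dp) (hlt : mask < 2 ^ m - 1) :
    pvGood m (pvMaskStep sub m dp mask) ∧
      pvPhiGe sub m (mask + 1) (pvMaskStep sub m dp mask) = pvPhiGe sub m mask dp := by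
  have hm : mask < 2 ^ m := by
    have := Nat.one_le_two_pow (n := m)
    omega
  have hne := pvComp_ne_nil m mask hlt
  obtain ⟨a, _, c⟩ := pvVloop sub m mask dp (List.range m) dp hGood hm hne
    (fun u hu => List.mem_range.mp hu) (fun x => rfl)
  refine ⟨a, ?_⟩
  unfold pvMaskStep
  rw [← pvPhiGt_eq_ge_succ, c, pvSum_getD_eq_wsum dp hGood.1 mask m _
    (fun k hk _ => (hGood.2 k hk).1)]
  rw [pvPhiGe_split sub m mask dp]
  have : pvWsum (fun k => if k.1 = mask then pvC sub k.2 (pvComp m mask) else 0) dp.items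
      = pvWsum (fun k => if k.1 = mask then pvCoef sub m k else 0) dp.items := by
    apply pvWsum_congr
    intro e _
    by_cases h : e.1.1 = mask
    · simp [h, pvCoef]
    · simp [h]
  rw [this]

theorem pvMaskloop (sub : List (List Int)) (m s : Nat) (hs : s < m) :
    ∀ n : Nat, n ≤ 2 ^ m - 2 →
      pvGood m ((List.range' 1 n).foldl (pvMaskStep sub m) (PySem.Dict.empty.insert (1 <<< s, s) 1)) ∧
      pvPhiGe sub m (n + 1) ((List.range' 1 n).foldl (pvMaskStep sub m) (PySem.Dict.empty.insert (1 <<< s, s) 1))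
        = pvCoef sub m (1 <<< s, s) := by
  intro n
  induction n with
  | zero =>
    intro _
    constructor
    · constructor
      · simp [PySem.Dict.insert, PySem.Dict.contains, PySem.Dict.empty, PySem.Dict.keys]
      · intro k hk
        simp [PySem.Dict.insert, PySem.Dict.contains, PySem.Dict.empty, PySem.Dict.keys] at hk
        subst hk
        refine ⟨hs, ?_, ?_⟩
        · simp [Nat.one_shiftLeft]
        · rw [Nat.one_shiftLeft]
          exact Nat.pow_lt_pow_right (by omega) hs
    · simp only [List.range'_zero, List.foldl_nil]
      have hitems : (PySem.Dict.empty.insert ((1 : Nat) <<< s, s) (1 : Int)).items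
          = [((1 <<< s, s), 1)] := by
        simp [PySem.Dict.insert, PySem.Dict.contains, PySem.Dict.empty]
      unfold pvPhiGe
      rw [hitems]
      have h1 : (1 : Nat) ≤ 1 <<< s := by
        rw [Nat.one_shiftLeft]
        exact Nat.one_le_two_pow
      simp [pvWsum, h1]
  | succ n ih =>
    intro hn
    have hn' : n ≤ 2 ^ m - 2 := by omega
    obtain ⟨a, b⟩ := ih hn'
    rw [List.range'_concat, List.foldl_append]
    simp only [List.foldl_cons, List.foldl_nil]
    have hmask : 1 + 1 * n = n + 1 := by omega
    rw [hmask]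
    obtain ⟨a2, b2⟩ := pvMaskStep_phi sub m (n + 1)
      ((List.range' 1 n).foldl (pvMaskStep sub m) (PySem.Dict.empty.insert (1 <<< s, s) 1)) a
      (by omega)
    exact ⟨a2, by rw [b2, b]⟩

theorem pvFoldl_id {α β : Type} (l : List β) (f : α → β → α) (a : α)
    (h : ∀ acc, ∀ x ∈ l, f acc x = acc) : l.foldl f a = a := by
  induction l generalizing a with
  | nil => rfl
  | cons x l ih =>
    rw [List.foldl_cons, h a x (by simp)]
    exact ih a (fun acc y hy => h acc y (by simp [hy]))

theorem pvMaskStep_full (sub : List (List Int)) (m : Nat) (dp : PySem.Dict (Nat × Nat) Int) :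
    pvMaskStep sub m dp (2 ^ m - 1) = dp := by
  unfold pvMaskStep
  apply pvFoldl_id
  intro acc v hv
  have hv' : v < m := List.mem_range.mp hv
  unfold pvVStep
  have hbit : (2 ^ m - 1).testBit v = true := by
    simp [Nat.testBit_two_pow_sub_one, hv']
  rw [pvTestBit, hbit]
  simp only [if_true]
  split
  · rfl
  · split
    · rfl
    · apply pvFoldl_id
      intro acc' u hu
      have hu' : u < m := List.mem_range.mp hu
      unfold pvUStep
      have hbitu : (2 ^ m - 1).testBit u = true := by
        simp [Nat.testBit_two_pow_sub_one, hu']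
      rw [pvTestBit, hbitu]
      simp

-- the core equivalence: A's DP block equals B's backtracking, for ANY matrix sub and start s < m
theorem pvCore (sub : List (List Int)) (m s : Nat) (hs : s < m) :
    (List.range m).foldl (fun acc v => acc +
        ((List.range' 1 ((1 <<< m) - 1)).foldl (pvMaskStep sub m)
          (PySem.Dict.empty.insert (1 <<< s, s) 1)).getD ((1 <<< m) - 1, v) 0) 0
      = recB sub m s ((List.range m).filter (fun u => u ≠ s)) := by
  have h2m : 2 ≤ 2 ^ m := by
    calc 2 = 2 ^ 1 := by norm_num
    _ ≤ 2 ^ m := Nat.pow_le_pow_right (by omega) (by omega)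
  simp only [Nat.one_shiftLeft]
  have hsplit : List.range' 1 (2 ^ m - 1) = List.range' 1 (2 ^ m - 2) ++ [2 ^ m - 1] := by
    have h1 : List.range' 1 ((2 ^ m - 2) + 1) = List.range' 1 (2 ^ m - 2) ++ [1 + 1 * (2 ^ m - 2)] :=
      List.range'_concat
    rw [show (2 ^ m - 2) + 1 = 2 ^ m - 1 from by omega] at h1
    rw [h1, show 1 + 1 * (2 ^ m - 2) = 2 ^ m - 1 from by omega]
  rw [hsplit, List.foldl_append]
  simp only [List.foldl_cons, List.foldl_nil]
  obtain ⟨hGood, hPhi⟩ := pvMaskloop sub m s hs (2 ^ m - 2) le_rfl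
  simp only [Nat.one_shiftLeft] at hGood hPhi
  rw [show 2 ^ m - 2 + 1 = 2 ^ m - 1 from by omega] at hPhi
  set dpF := (List.range' 1 (2 ^ m - 2)).foldl (pvMaskStep sub m)
      (PySem.Dict.empty.insert (2 ^ s, s) 1) with hdpF
  rw [pvMaskStep_full sub m dpF]
  -- turn the answer fold into a weighted item sum
  rw [PySem.List.foldl_add (List.range m) (fun v => dpF.getD (2 ^ m - 1, v) 0) 0]
  have hmap1 : (List.range m).map (fun v => dpF.getD (2 ^ m - 1, v) 0)
      = (List.range m).map (fun v => dpF.getD (2 ^ m - 1, v) 0 * (fun _ => (1 : Int)) v) := by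
    apply List.map_congr_left
    intro v _
    simp
  rw [zero_add, hmap1, pvSum_getD_eq_wsum dpF hGood.1 (2 ^ m - 1) m _
    (fun k hk _ => (hGood.2 k hk).1)]
  have hws : pvWsum (fun k => if k.1 = 2 ^ m - 1 then (1 : Int) else 0) dpF.items
      = pvWsum (fun k => if 2 ^ m - 1 ≤ k.1 then pvCoef sub m k else 0) dpF.items := by
    apply pvWsum_congr
    intro e he
    have hkey : e.1 ∈ dpF.keys := List.mem_map_of_mem he
    have hlt := (hGood.2 e.1 hkey).2.2
    by_cases h : e.1.1 = 2 ^ m - 1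
    · have hle : 2 ^ m - 1 ≤ e.1.1 := by omega
      have hc1 : pvCoef sub m e.1 = 1 := by
        unfold pvCoef
        rw [h, pvComp_full, pvC_nil]
      rw [if_pos h, if_pos hle, hc1]
    · have hle : ¬ (2 ^ m - 1 ≤ e.1.1) := by omega
      rw [if_neg h, if_neg hle]
  rw [hws]
  change pvPhiGe sub m (2 ^ m - 1) dpF = _ at hPhi ⊢
  rw [hPhi]
  unfold pvCoef
  rw [pvComp_two_pow m s]
  have hflt : ((List.range m).filter (fun u => u ≠ s)).length < m := by
    have := pvFilter_lt (List.range m) s (List.mem_range.mpr hs)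
    simpa using this
  exact recB_fuel sub ((List.range m).filter (fun u => u ≠ s)).length _ _ s _
    le_rfl (by omega) (by omega)

theorem pvIdx_not_mem (x : Int) : ∀ (l : List Int) (st : Int) (d : PySem.Dict Int Int),
    x ∉ l → ((PySem.List.enumerate l st).foldl (fun d kv => d.insert kv.2 kv.1) d).get? x = d.get? x := by
  intro l
  induction l with
  | nil => intro st d _; simp [PySem.List.enumerate]
  | cons a l ih =>
    intro st d hx
    rw [PySem.List.enumerate_cons, List.foldl_cons]
    rw [ih (st + 1) _ (fun h => hx (by simp [h]))]
    apply PySem.Dict.get?_insert_of_ne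
    intro h
    exact hx (by simp [h])

theorem pvIdx_mem (x : Int) : ∀ (l : List Int) (st : Int) (d : PySem.Dict Int Int),
    x ∈ l → ∃ j : Int, ((PySem.List.enumerate l st).foldl (fun d kv => d.insert kv.2 kv.1) d).get? x = some j ∧
      st ≤ j ∧ j < st + l.length := by
  intro l
  induction l with
  | nil => intro st d hx; simp at hx
  | cons a l ih =>
    intro st d hx
    rw [PySem.List.enumerate_cons, List.foldl_cons]
    by_cases hxl : x ∈ l
    · obtain ⟨j, hj, h1, h2⟩ := ih (st + 1) (d.insert a st) hxl
      exact ⟨j, hj, by omega, by simp at h2 ⊢; omega⟩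
    · have hxa : x = a := by
        rcases List.mem_cons.mp hx with h | h
        · exact h
        · exact absurd h hxl
      refine ⟨st, ?_, le_rfl, by simp only [List.length_cons]; omega⟩
      rw [pvIdx_not_mem x l (st + 1) _ hxl]
      subst hxa
      exact PySem.Dict.get?_insert_self _ _ _

theorem pvIdx_bound (vlist : List Int) (source : Int) (h : source ∈ vlist) :
    ((pvIdx vlist).getD source 0).toNat < vlist.length := by
  unfold pvIdx
  obtain ⟨j, hj, h1, h2⟩ := pvIdx_mem source vlist 0 PySem.Dict.empty h
  rw [PySem.Dict.getD_eq_get?_getD, hj]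
  simp at h2 ⊢
  omega

-- ===== VERDICT (by name: the statement is the Claim_ definition above) =====
theorem h_start_spec : Claim_equal_h_start := by
  intro T vertices source _hDom hPre
  unfold Spec_h_start h_start h_start_alt
  by_cases hg : vertices.length = 1
  · simp [hg]
  · simp only [hg, if_false]
    have hsrc : source ∈ vertices := by
      rcases hPre with h1 | ⟨h2, _⟩
      · exact absurd h1 hg
      · exact h2
    have hmem : source ∈ PySem.List.sorted vertices (fun v => v) :=
      (PySem.List.sorted_perm vertices (fun v => v) false).mem_iff.mpr hsrc
    exact pvCore _ _ _ (pvIdx_bound _ _ hmem)
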